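-- pv_equiv track=rewrite | github.com/Seth-Bullock/EvoLyrics | new_lyric_ga.py | set_mutation_operator_rates
-- ===== SOURCE A (Python) =====
-- def set_mutation_operator_rates(mutation_operator_rates):
--
--     # default rates of different types of mutation
--     default_mutation_operator_rates = {
--         "insert_rate":   0,
--         "delete_rate":   0,
--         "point_rate" : 100,
--         "extend_rate":   0
--     }
--
--     for operator, rate in mutation_operator_rates.items():
--         if operator in default_mutation_operator_rates:
--             default_mutation_operator_rates[operator] = rate
--
--     operators = []
--     rates = []
--     for operator, rate in default_mutation_operator_rates.items():
--         operators.append(operator.split("_")[0])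
--         rates.append(rate)
--
--     return operators, rates
-- ===== SOURCE B (Python) =====
-- DEFAULTS = (("insert_rate", 0), ("delete_rate", 0), ("point_rate", 100), ("extend_rate", 0))
--
-- def set_mutation_operator_rates(mutation_operator_rates):
--     operators = []
--     rates = []
--     for key, default_rate in DEFAULTS:
--         operators.append(key.split("_")[0])
--         rates.append(mutation_operator_rates.get(key, default_rate))
--     return operators, rates
-- ===== Notes on version B (the rewrite author's own statement) =====
-- stated objective: simpler
-- what changed: B iterates a fixed ordered tuple of (key, default) pairs once, reading each rate with dict.get, instead of building and mutating a defaults dict by scanning the input dict and then iterating that dict again.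
import Mathlib
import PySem

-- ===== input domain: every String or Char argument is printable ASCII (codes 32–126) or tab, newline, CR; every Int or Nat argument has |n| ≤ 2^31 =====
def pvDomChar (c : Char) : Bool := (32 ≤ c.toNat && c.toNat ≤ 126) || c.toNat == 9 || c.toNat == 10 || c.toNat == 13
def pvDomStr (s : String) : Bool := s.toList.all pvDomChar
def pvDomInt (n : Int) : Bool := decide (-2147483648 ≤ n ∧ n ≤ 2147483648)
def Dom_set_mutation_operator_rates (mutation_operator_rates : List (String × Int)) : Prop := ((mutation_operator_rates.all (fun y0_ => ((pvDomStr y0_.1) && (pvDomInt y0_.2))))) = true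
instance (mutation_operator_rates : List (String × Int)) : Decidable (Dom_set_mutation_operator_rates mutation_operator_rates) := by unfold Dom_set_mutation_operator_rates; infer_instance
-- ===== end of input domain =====

-- B replaces A's build-then-mutate-then-iterate defaults dict with one pass over a fixed
-- (key, default) sequence read via dict.get — simpler decomposition, same result.


-- ===== PORT A =====
-- operator.split("_")[0]: split? with a nonempty separator always returns some nonempty
-- list, so the [0] index (headD) is exact and never raises.
def pvSplitHead (op : String) : String :=
  (((PySem.Str.split? op "_").getD []).headD "")

def set_mutation_operator_rates (mutation_operator_rates : List (String × Int)) : List String × List Int :=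
  -- default_mutation_operator_rates = {...}
  let d0 : PySem.Dict String Int :=
    PySem.Dict.ofList [("insert_rate", 0), ("delete_rate", 0), ("point_rate", 100), ("extend_rate", 0)]
  -- for operator, rate in mutation_operator_rates.items(): if operator in defaults: defaults[operator] = rate
  let d1 := mutation_operator_rates.foldl
    (fun d p => if d.contains p.1 then d.insert p.1 p.2 else d) d0
  -- for operator, rate in default_mutation_operator_rates.items(): append …
  let res := d1.items.foldl
    (fun (acc : List String × List Int) p => (acc.1 ++ [pvSplitHead p.1], acc.2 ++ [p.2]))
    ([], [])
  res

-- ===== PORT B =====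
def pvDefaults : List (String × Int) :=
  [("insert_rate", 0), ("delete_rate", 0), ("point_rate", 100), ("extend_rate", 0)]

-- mutation_operator_rates.get(key, default): Python-dict lookup (duplicate keys in the
-- association list collapse last-wins, as dict construction does)
def pvDictGetD (xs : List (String × Int)) (k : String) (dflt : Int) : Int :=
  xs.foldl (fun acc p => if p.1 == k then p.2 else acc) dflt

def set_mutation_operator_rates_alt (mutation_operator_rates : List (String × Int)) : List String × List Int :=
  (pvDefaults.map (fun p => pvSplitHead p.1),
   pvDefaults.map (fun p => pvDictGetD mutation_operator_rates p.1 p.2))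

-- ===== PRECONDITION & SPEC =====
def Spec_set_mutation_operator_rates (mutation_operator_rates : List (String × Int)) (out : List String × List Int) : Prop := out = set_mutation_operator_rates_alt mutation_operator_rates
instance (mutation_operator_rates : List (String × Int)) (out : List String × List Int) : Decidable (Spec_set_mutation_operator_rates mutation_operator_rates out) := by unfold Spec_set_mutation_operator_rates; infer_instance

-- ===== CLAIM (what is proved, stated in full; the proofs are below) =====
def Claim_equal_set_mutation_operator_rates : Prop := ∀ (mutation_operator_rates : List (String × Int)), Dom_set_mutation_operator_rates mutation_operator_rates → Spec_set_mutation_operator_rates mutation_operator_rates (set_mutation_operator_rates mutation_operator_rates)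

-- ===== LEMMAS AND PROOFS =====

-- the A-side update step
def pvStep (d : PySem.Dict String Int) (p : String × Int) : PySem.Dict String Int :=
  if d.contains p.1 then d.insert p.1 p.2 else d

lemma pvStep_keys (d : PySem.Dict String Int) (p : String × Int) :
    (pvStep d p).keys = d.keys := by
  unfold pvStep
  split_ifs with h
  · exact PySem.Dict.keys_insert_of_contains d p.2 h
  · rfl

lemma pvFold_keys (l : List (String × Int)) (d : PySem.Dict String Int) :
    (l.foldl pvStep d).keys = d.keys := by
  induction l generalizing d with
  | nil => rfl
  | cons p l ih => simp [List.foldl, ih, pvStep_keys]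

lemma pvFold_getD (l : List (String × Int)) (d : PySem.Dict String Int) (k : String)
    (hk : d.contains k = true) (v0 : Int) :
    (l.foldl pvStep d).getD k v0 = pvDictGetD l k (d.getD k v0) := by
  induction l generalizing d with
  | nil => rfl
  | cons p l ih =>
    simp only [List.foldl, pvDictGetD, pvStep]
    by_cases hpk : p.1 = k
    · subst hpk
      rw [if_pos hk]
      have hc : (d.insert p.1 p.2).contains p.1 = true := PySem.Dict.contains_insert_self d p.1 p.2
      have := ih (d.insert p.1 p.2) hc
      rw [PySem.Dict.getD_insert_self] at this
      simp [pvDictGetD] at this ⊢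
      rw [this]
    · have hne : p.1 ≠ k := hpk
      by_cases hc : d.contains p.1
      · rw [if_pos hc]
        have hk' : (d.insert p.1 p.2).contains k = true := by
          rw [PySem.Dict.contains_insert]; simp [hk]
        have := ih (d.insert p.1 p.2) hk'
        simp [pvDictGetD] at this ⊢
        rw [this, PySem.Dict.getD_insert_of_ne d p.2 v0 (Ne.symm hne)]
        simp [hne]
      · rw [if_neg hc]
        have := ih d hk
        simp [pvDictGetD] at this ⊢
        rw [this]
        simp [hne]

-- the output loop of A appends elementwise
lemma pvOut_foldl (items : List (String × Int)) (acc : List String × List Int) :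
    items.foldl (fun (acc : List String × List Int) p => (acc.1 ++ [pvSplitHead p.1], acc.2 ++ [p.2])) acc
      = (acc.1 ++ items.map (fun p => pvSplitHead p.1), acc.2 ++ items.map (·.2)) := by
  induction items generalizing acc with
  | nil => simp
  | cons p l ih => simp [List.foldl, ih]

-- ===== VERDICT (by name: the statement is the Claim_ definition above) =====
theorem set_mutation_operator_rates_spec : Claim_equal_set_mutation_operator_rates := by
  intro l _
  unfold Spec_set_mutation_operator_rates set_mutation_operator_rates set_mutation_operator_rates_alt
  simp only []
  set d0 : PySem.Dict String Int :=
    PySem.Dict.ofList [("insert_rate", 0), ("delete_rate", 0), ("point_rate", 100), ("extend_rate", 0)] with hd0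
  have hkeys : (l.foldl pvStep d0).keys = d0.keys := pvFold_keys l d0
  have hnd : (l.foldl pvStep d0).keys.Nodup := by rw [hkeys]; decide
  have hitems : (l.foldl pvStep d0).items
      = (l.foldl pvStep d0).keys.map (fun k => (k, (l.foldl pvStep d0).getD k 0)) :=
    PySem.Dict.items_eq_map_keys _ hnd 0
  have hk0 : d0.keys = ["insert_rate", "delete_rate", "point_rate", "extend_rate"] := by decide
  have hget : ∀ k v0, d0.contains k = true → d0.getD k v0 = v0 →
      (l.foldl pvStep d0).getD k 0 = pvDictGetD l k v0 := by
    intro k v0 hc hgd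
    have := pvFold_getD l d0 k hc 0
    rw [this]
    have : d0.getD k 0 = d0.getD k v0 := by
      rcases h : d0.get? k with _ | w
      · rw [PySem.Dict.contains_eq_isSome_get?, h] at hc; simp at hc
      · rw [PySem.Dict.getD_of_get?_eq_some d0 0 h, PySem.Dict.getD_of_get?_eq_some d0 v0 h]
    rw [this, hgd]
  show (List.foldl _ ([], []) (l.foldl pvStep d0).items) = _
  rw [pvOut_foldl, hitems, hkeys, hk0]
  simp only [List.map_cons, List.map_nil, List.nil_append, pvDefaults]
  refine Prod.ext rfl ?_
  rw [hget "insert_rate" 0 (by decide) (by decide),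
      hget "delete_rate" 0 (by decide) (by decide),
      hget "point_rate" 100 (by decide) (by decide),
      hget "extend_rate" 0 (by decide) (by decide)]
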